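-- pv_equiv track=rewrite | github.com/Jadhusan24/Python-Hex-Dump | hex_dump.py | encode_hex
-- ===== SOURCE A (Python) =====
-- def encode_hex(byte_block):
--     hex_ = []
--     for x in byte_block:
--         hex_.append(f"{x:02x}")
--     hex_ = list(zip(hex_[::2], hex_[1::2]))
--     bytes_to_hex = ""
--     for x in hex_:
--         bytes_to_hex += f"{x[0]}{x[1]} "
--     return bytes_to_hex
-- ===== SOURCE B (Python) =====
-- def encode_hex(byte_block):
--     block = list(byte_block)
--     parts = []
--     while len(block) >= 2:
--         parts.append(f"{block[0]:02x}{block[1]:02x} ")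
--         block = block[2:]
--     return "".join(parts)
-- ===== Notes on version B (the rewrite author's own statement) =====
-- stated objective: alternative
-- what changed: B consumes the block two bytes at a time, formatting each pair directly and joining the pieces, instead of A's pipeline of a full hex-string list, two stride-2 slices and a zip of the slices.
import Mathlib
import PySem

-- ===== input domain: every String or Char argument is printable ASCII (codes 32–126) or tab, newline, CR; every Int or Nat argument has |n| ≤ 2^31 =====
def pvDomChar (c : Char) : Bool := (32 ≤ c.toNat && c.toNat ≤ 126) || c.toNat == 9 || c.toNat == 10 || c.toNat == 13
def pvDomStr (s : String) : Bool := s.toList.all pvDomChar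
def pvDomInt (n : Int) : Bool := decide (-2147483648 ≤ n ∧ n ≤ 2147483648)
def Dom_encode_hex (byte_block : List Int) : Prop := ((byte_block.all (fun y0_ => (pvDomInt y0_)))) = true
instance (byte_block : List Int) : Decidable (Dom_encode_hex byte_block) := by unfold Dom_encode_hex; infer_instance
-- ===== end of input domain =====

-- B formats the block two bytes at a time and joins the pieces, replacing A's hex-list + stride-2 slices + zip pipeline; alternative decomposition, same cost.

-- ===== PORT A =====
-- shared helper: exact port of Python's f"{x:02x}" (lowercase hex of |x|, '-' in front
-- for negatives, zero-filled to width 2 with the sign kept in front — exactly str.zfill)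
def hexDigit (n : Nat) : Char := if n < 10 then Char.ofNat (48 + n) else Char.ofNat (87 + n)

-- fuel-based structural recursion (n+1 fuel always suffices: n/16 < n for n ≥ 16)
def hexCharsAux : Nat → Nat → List Char
  | 0, _ => []
  | fuel + 1, n => if n < 16 then [hexDigit n] else hexCharsAux fuel (n / 16) ++ [hexDigit (n % 16)]

def hexChars (n : Nat) : List Char := hexCharsAux (n + 1) n

def fmt02x (x : Int) : List Char :=
  PySem.Chars.zfill (if x < 0 then '-' :: hexChars x.natAbs else hexChars x.toNat) 2

-- A: build the list of hex strings, zip its even- and odd-indexed slices, concatenate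
def encode_hex (byte_block : List Int) : String :=
  let hex1 : List (List Char) := byte_block.foldl (fun acc x => acc ++ [fmt02x x]) []
  -- hex_[::2] and hex_[1::2]; step 2 ≠ 0 so slice? is always some — .getD [] never fires
  let ev : List (List Char) := (PySem.List.slice? hex1 none none 2).getD []
  let od : List (List Char) := (PySem.List.slice? hex1 (some 1) none 2).getD []
  String.ofList ((ev.zip od).foldl (fun acc p => acc ++ p.1 ++ p.2 ++ [' ']) [])

-- ===== PORT B =====
-- Source B's while-loop: `while len(block) >= 2: parts.append(pair); block = block[2:]`
-- is the two-at-a-time structural recursion below; then "".join(parts).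
def altParts : List Int → List (List Char)
  | a :: b :: t => (fmt02x a ++ fmt02x b ++ [' ']) :: altParts t
  | _ => []

def encode_hex_alt (byte_block : List Int) : String :=
  String.ofList (PySem.Chars.join [] (altParts byte_block))

-- ===== PRECONDITION & SPEC =====
def Spec_encode_hex (byte_block : List Int) (out : String) : Prop := out = encode_hex_alt byte_block
instance (byte_block : List Int) (out : String) : Decidable (Spec_encode_hex byte_block out) := by unfold Spec_encode_hex; infer_instance

-- ===== CLAIM (what is proved, stated in full; the proofs are below) =====
def Claim_equal_encode_hex : Prop := ∀ (byte_block : List Int), Dom_encode_hex byte_block → Spec_encode_hex byte_block (encode_hex byte_block)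

-- ===== LEMMAS AND PROOFS =====

-- the even- and odd-indexed elements of a list
def evensL {α : Type} : List α → List α
  | [] => []
  | [a] => [a]
  | a :: _ :: t => a :: evensL t

def oddsL {α : Type} : List α → List α
  | [] => []
  | _ :: t => evensL t

lemma evensL_cons {α : Type} (x : α) (t : List α) : evensL (x :: t) = x :: oddsL t := by
  cases t <;> simp [evensL, oddsL]

lemma filterMap_range_evens {α : Type} (xs : List α) (n : Nat) (h : n = (xs.length + 1) / 2) :
    List.filterMap (fun k : Nat => xs[2 * k]?) (List.range n) = evensL xs := by
  induction xs using evensL.induct generalizing n with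
  | case1 => subst h; simp [evensL]
  | case2 a => subst h; simp [evensL]
  | case3 a b t ih =>
    subst h
    have hn : (((a :: b :: t).length + 1) / 2) = (t.length + 1) / 2 + 1 := by
      simp; omega
    rw [hn, List.range_succ_eq_map, List.filterMap_cons, List.filterMap_map]
    simp only [Nat.mul_zero, List.getElem?_cons_zero]
    rw [evensL]
    congr 1
    rw [← ih ((t.length + 1) / 2) rfl]
    apply List.filterMap_congr
    intro k _
    have : 2 * Nat.succ k = 2 * k + 1 + 1 := by omega
    simp [Function.comp, this]

lemma slice?_evens {α : Type} (xs : List α) :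
    PySem.List.slice? xs none none 2 = some (evensL xs) := by
  simp only [PySem.List.slice?, PySem.List.sliceIndices]
  norm_num
  have hcnt : (if 0 < xs.length then (((xs.length:Int) + 2 - 1) / 2).toNat else 0)
      = (xs.length + 1) / 2 := by
    split <;> omega
  rw [hcnt, ← filterMap_range_evens xs ((xs.length + 1) / 2) rfl]
  apply List.filterMap_congr
  intro k _
  have : ((2:Int) * (k:Int)).toNat = 2 * k := by omega
  rw [this]

lemma slice?_odds {α : Type} (xs : List α) :
    PySem.List.slice? xs (some 1) none 2 = some (oddsL xs) := by
  cases xs with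
  | nil => simp [PySem.List.slice?, PySem.List.sliceIndices, oddsL]
  | cons a t =>
    simp only [PySem.List.slice?, PySem.List.sliceIndices]
    norm_num
    have hcnt : (if 0 < t.length then (((t.length:Int) + 2 - 1) / 2).toNat else 0)
        = (t.length + 1) / 2 := by
      split <;> omega
    rw [hcnt]
    show List.filterMap (fun k : Nat => (a :: t)[((1:Int) + 2 * (k:Int)).toNat]?) _ = evensL t
    rw [← filterMap_range_evens t ((t.length + 1) / 2) rfl]
    apply List.filterMap_congr
    intro k _
    have h1 : ((1:Int) + 2 * (k:Int)).toNat = 2 * k + 1 := by omega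
    rw [h1]
    simp

-- the flat pair-concatenation both programs produce
def pairsC : List Int → List Char
  | a :: b :: t => fmt02x a ++ (fmt02x b ++ (' ' :: pairsC t))
  | _ => []

lemma foldl_zip_pairs (xs : List Int) (acc : List Char) :
    ((evensL (xs.map fmt02x)).zip (oddsL (xs.map fmt02x))).foldl
        (fun acc p => acc ++ p.1 ++ p.2 ++ [' ']) acc = acc ++ pairsC xs := by
  induction xs using evensL.induct generalizing acc with
  | case1 => simp [evensL, oddsL, pairsC]
  | case2 a => simp [evensL, oddsL, pairsC]
  | case3 a b t ih =>
    simp only [List.map_cons]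
    have he : evensL (fmt02x a :: fmt02x b :: List.map fmt02x t)
        = fmt02x a :: evensL (List.map fmt02x t) := rfl
    have ho : oddsL (fmt02x a :: fmt02x b :: List.map fmt02x t)
        = fmt02x b :: oddsL (List.map fmt02x t) := evensL_cons _ _
    rw [he, ho]
    simp only [List.zip_cons_cons, List.foldl_cons, pairsC]
    rw [ih]
    simp

lemma join_altParts (xs : List Int) : PySem.Chars.join [] (altParts xs) = pairsC xs := by
  induction xs using evensL.induct with
  | case1 => simp [altParts, pairsC, PySem.Chars.join, List.intercalate]
  | case2 a => simp [altParts, pairsC, PySem.Chars.join, List.intercalate]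
  | case3 a b t ih =>
    show PySem.Chars.join [] ((fmt02x a ++ fmt02x b ++ [' ']) :: altParts t) = pairsC (a :: b :: t)
    rw [pairsC, ← ih]
    cases htp : altParts t with
    | nil => simp [PySem.Chars.join, List.intercalate]
    | cons p ps => rw [PySem.Chars.join_cons_cons]; simp

-- ===== VERDICT (by name: the statement is the Claim_ definition above) =====
theorem encode_hex_spec : Claim_equal_encode_hex := by
  intro bb _
  unfold Spec_encode_hex
  simp only [encode_hex, encode_hex_alt, PySem.List.foldl_append_singleton_eq_map,
    List.nil_append]
  rw [slice?_evens, slice?_odds]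
  simp only [Option.getD_some]
  rw [foldl_zip_pairs bb [], join_altParts, List.nil_append]
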